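-- pv_equiv track=rewrite | github.com/Mattylam/Website | model/user.py | encrypt_password
-- ===== SOURCE A (Python) =====
-- def encrypt_password(password):
--     """
--      This method encrypts the input_password to a string that is difficult to read by humans
--
--      a : integer
--
--      returns a string of encrypted password
--      """
--     # the goal of this function is to encrypt password
--     a = str(password)
--     # the following function defines the length and calculates the characters used.
--     password_len = len(a)
--     all_punctuation = """!"#$%&'()*+,-./:;<=>?@[\]^_`{|}~"""
--     first = len(all_punctuation) % password_len
--     firstcharacter = all_punctuation[first]
--     secondcharacter = all_punctuation[password_len % 5]
--     thirdcharacter = all_punctuation[password_len % 10]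
--     # encrypt is defined as ^^^ because it is the requirement to add ^^^ in all passwords.
--     encrypt = "^^^"
--     # for function runs with step size 3, because the conditions loops every three characters.
--     for i in range(0, len(a), 3):
--         if i < len(a):
--             # this if condition makes sure i is within the range of input
--             encrypt += firstcharacter
--             encrypt += a[i]
--             encrypt += firstcharacter
--             if i + 1 < len(a):
--                 encrypt += secondcharacter * 2
--                 encrypt += a[i + 1]
--                 encrypt += secondcharacter * 2
--                 if i + 2 < len(a):
--                     encrypt += thirdcharacter * 3
--                     encrypt += a[i + 2]
--                     encrypt += thirdcharacter * 3
--     encrypt += "$$$"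
--     return encrypt
-- ===== SOURCE B (Python) =====
-- def encrypt_password(password):
--     a = str(password)
--     n = len(a)
--     all_punctuation = """!"#$%&'()*+,-./:;<=>?@[\]^_`{|}~"""
--     d1 = all_punctuation[len(all_punctuation) % n]
--     d2 = all_punctuation[n % 5] * 2
--     d3 = all_punctuation[n % 10] * 3
--
--     def chunks(s):
--         # recursion on the string, three characters at a time
--         if not s:
--             return ''
--         out = d1 + s[0] + d1
--         if len(s) > 1:
--             out += d2 + s[1] + d2
--         if len(s) > 2:
--             out += d3 + s[2] + d3 + chunks(s[3:])
--         return out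
--
--     return '^^^' + chunks(a) + '$$$'
-- ===== Notes on version B (the rewrite author's own statement) =====
-- stated objective: simpler
-- what changed: Replaces the stride-3 index loop with its three nested i+k<len guards by structural recursion on the string that consumes up to three characters per call, with the doubled/tripled decorators precomputed once; no index arithmetic remains.
import Mathlib
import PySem

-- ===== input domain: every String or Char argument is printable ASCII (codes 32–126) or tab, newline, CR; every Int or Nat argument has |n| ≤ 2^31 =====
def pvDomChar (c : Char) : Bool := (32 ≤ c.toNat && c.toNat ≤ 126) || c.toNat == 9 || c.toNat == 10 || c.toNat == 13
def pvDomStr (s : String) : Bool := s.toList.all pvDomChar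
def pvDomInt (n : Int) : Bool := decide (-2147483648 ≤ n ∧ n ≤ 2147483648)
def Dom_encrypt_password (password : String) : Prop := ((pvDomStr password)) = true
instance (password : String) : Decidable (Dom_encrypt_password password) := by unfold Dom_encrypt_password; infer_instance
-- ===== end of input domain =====

-- B replaces A's stride-3 index loop (with nested i+k < len guards) by structural
-- recursion on the character list, three characters at a time: a simpler decomposition.

-- the punctuation table both versions use (32 characters)
def pvPunct : List Char := "!\"#$%&'()*+,-./:;<=>?@[\\]^_`{|}~".toList

-- ===== PORT A =====
-- the body of A's `for i in range(0, len(a), 3)` loop, as a named helper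
def pvLoopBody (a : List Char) (firstcharacter secondcharacter thirdcharacter : Char)
    (encrypt : List Char) (i : Int) : List Char :=
  if i < (a.length : Int) then
    let e1 := encrypt ++ [firstcharacter] ++ [PySem.List.pyGetD a i '!'] ++ [firstcharacter]
    if i + 1 < (a.length : Int) then
      let e2 := e1 ++ [secondcharacter, secondcharacter] ++ [PySem.List.pyGetD a (i + 1) '!']
                   ++ [secondcharacter, secondcharacter]
      if i + 2 < (a.length : Int) then
        e2 ++ [thirdcharacter, thirdcharacter, thirdcharacter]
           ++ [PySem.List.pyGetD a (i + 2) '!']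
           ++ [thirdcharacter, thirdcharacter, thirdcharacter]
      else e2
    else e1
  else encrypt

def encrypt_password (password : String) : String :=
  let a := password.toList
  let password_len := a.length
  let all_punctuation := pvPunct
  let first := all_punctuation.length % password_len
  let firstcharacter := all_punctuation.getD first '!'
  let secondcharacter := all_punctuation.getD (password_len % 5) '!'
  let thirdcharacter := all_punctuation.getD (password_len % 10) '!'
  let encrypt :=
    (PySem.List.pyRange 0 (password_len : Int) 3).foldl
      (pvLoopBody a firstcharacter secondcharacter thirdcharacter)
      ['^', '^', '^']
  String.mk (encrypt ++ ['$', '$', '$'])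

-- ===== PORT B =====
-- B's recursive helper `chunks`: consumes up to three characters per call
def pvChunks (d1 d2 d3 : List Char) : List Char → List Char
  | [] => []
  | [x] => d1 ++ x :: d1
  | [x, y] => d1 ++ x :: (d1 ++ d2 ++ y :: d2)
  | x :: y :: z :: rest =>
      d1 ++ x :: (d1 ++ d2 ++ y :: (d2 ++ d3 ++ z :: (d3 ++ pvChunks d1 d2 d3 rest)))

def encrypt_password_alt (password : String) : String :=
  let a := password.toList
  let n := a.length
  let all_punctuation := pvPunct
  let d1 := [all_punctuation.getD (all_punctuation.length % n) '!']
  let d2 := List.replicate 2 (all_punctuation.getD (n % 5) '!')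
  let d3 := List.replicate 3 (all_punctuation.getD (n % 10) '!')
  String.mk ('^' :: '^' :: '^' :: (pvChunks d1 d2 d3 a ++ ['$', '$', '$']))

-- ===== PRECONDITION & SPEC =====
-- Pre_ excludes exactly the inputs on which Python A raises: the empty string
-- (ZeroDivisionError in `% password_len`) and strings longer than 32 characters
-- (then 32 % len = 32 and `all_punctuation[32]` raises IndexError).
def Pre_encrypt_password (password : String) : Prop :=
  1 ≤ password.toList.length ∧ password.toList.length ≤ 32
instance (password : String) : Decidable (Pre_encrypt_password password) := by
  unfold Pre_encrypt_password; infer_instance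

def pvWitness_encrypt_password : String := "abc"

def Spec_encrypt_password (password : String) (out : String) : Prop :=
  out = encrypt_password_alt password
instance (password : String) (out : String) : Decidable (Spec_encrypt_password password out) := by
  unfold Spec_encrypt_password; infer_instance

-- ===== CLAIM (what is proved, stated in full; the proofs are below) =====
def Claim_equal_encrypt_password : Prop :=
  ∀ (password : String), Dom_encrypt_password password → Pre_encrypt_password password →
    Spec_encrypt_password password (encrypt_password password)

-- ===== LEMMAS AND PROOFS =====

lemma pyRange3_nil (a b : Int) (h : b ≤ a) : PySem.List.pyRange a b 3 = [] := by
  rw [PySem.List.pyRange_of_pos a b (by norm_num)]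
  rw [if_neg (by omega)]
  simp

lemma pyRange3_cons (a b : Int) (h : a < b) :
    PySem.List.pyRange a b 3 = a :: PySem.List.pyRange (a + 3) b 3 := by
  rw [PySem.List.pyRange_of_pos a b (by norm_num),
      PySem.List.pyRange_of_pos (a + 3) b (by norm_num)]
  have hc : ((b - a + 3 - 1) / 3).toNat
      = (if a + 3 < b then ((b - (a + 3) + 3 - 1) / 3).toNat else 0) + 1 := by
    split_ifs <;> omega
  rw [if_pos h, hc, List.range_succ_eq_map]
  simp only [List.map_cons, List.map_map]
  congr 1
  · push_cast; ring
  · exact List.map_congr_left (fun k _ => by simp [Function.comp]; ring)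

lemma loopA_aux (a : List Char) (fc sc tc : Char) :
    ∀ (k i : Nat) (acc : List Char), a.length ≤ i + k →
      (PySem.List.pyRange (i : Int) (a.length : Int) 3).foldl (pvLoopBody a fc sc tc) acc
        = acc ++ pvChunks [fc] [sc, sc] [tc, tc, tc] (a.drop i) := by
  intro k
  induction k with
  | zero =>
      intro i acc h
      rw [pyRange3_nil _ _ (by exact_mod_cast h)]
      rw [List.drop_eq_nil_of_le (by omega)]
      simp [pvChunks]
  | succ k ih =>
      intro i acc h
      by_cases hin : i < a.length
      · rw [pyRange3_cons _ _ (by exact_mod_cast hin)]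
        have h3 : ((i : Int) + 3) = ((i + 3 : Nat) : Int) := by push_cast; ring
        rw [List.foldl_cons, h3, ih (i + 3) _ (by omega)]
        have hget : ∀ (j : Nat) (hj : j < a.length),
            PySem.List.pyGetD a (j : Int) '!' = a[j]'hj := by
          intro j hj
          simp [PySem.List.pyGetD_natCast, List.getElem?_eq_getElem hj]
        by_cases h1 : i + 1 < a.length
        · by_cases h2 : i + 2 < a.length
          · -- full chunk of three
            have hd : a.drop i = a[i] :: a[i+1] :: a[i+2] :: a.drop (i + 3) := by
              rw [List.drop_eq_getElem_cons hin, List.drop_eq_getElem_cons h1,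
                  List.drop_eq_getElem_cons h2]
            rw [hd]
            simp only [pvLoopBody, pvChunks]
            rw [if_pos (by exact_mod_cast hin), if_pos (by omega),
                if_pos (by omega)]
            have e1 : (i : Int) + 1 = ((i + 1 : Nat) : Int) := by push_cast; ring
            have e2 : (i : Int) + 2 = ((i + 2 : Nat) : Int) := by push_cast; ring
            rw [e1, e2, hget i hin, hget (i+1) h1, hget (i+2) h2]
            simp
          · -- exactly two characters remain
            have hlen : a.length = i + 2 := by omega
            have hd : a.drop i = [a[i], a[i+1]] := by
              rw [List.drop_eq_getElem_cons hin, List.drop_eq_getElem_cons h1,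
                  List.drop_eq_nil_of_le (by omega)]
            rw [hd]
            simp only [pvLoopBody, pvChunks]
            rw [if_pos (by exact_mod_cast hin), if_pos (by omega),
                if_neg (by omega)]
            have e1 : (i : Int) + 1 = ((i + 1 : Nat) : Int) := by push_cast; ring
            rw [e1, hget i hin, hget (i+1) h1]
            rw [List.drop_eq_nil_of_le (by omega : a.length ≤ i + 3)]
            simp [pvChunks]
        · -- exactly one character remains
          have hd : a.drop i = [a[i]] := by
            rw [List.drop_eq_getElem_cons hin, List.drop_eq_nil_of_le (by omega)]
          rw [hd]
          simp only [pvLoopBody, pvChunks]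
          rw [if_pos (by exact_mod_cast hin), if_neg (by omega)]
          rw [hget i hin]
          rw [List.drop_eq_nil_of_le (by omega : a.length ≤ i + 3)]
          simp [pvChunks]
      · rw [pyRange3_nil _ _ (by exact_mod_cast (by omega : a.length ≤ i))]
        rw [List.drop_eq_nil_of_le (by omega)]
        simp [pvChunks]

-- ===== VERDICT (by name: the statement is the Claim_ definition above) =====
theorem encrypt_password_spec : Claim_equal_encrypt_password := by
  intro password _ _
  unfold Spec_encrypt_password encrypt_password encrypt_password_alt
  have h := loopA_aux password.toList
    (pvPunct.getD (pvPunct.length % password.toList.length) '!')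
    (pvPunct.getD (password.toList.length % 5) '!')
    (pvPunct.getD (password.toList.length % 10) '!')
    password.toList.length 0 ['^', '^', '^'] (by omega)
  simp only [Int.natCast_zero] at h
  simp only [h, List.drop_zero, List.replicate]
  simp
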